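-- pv_equiv track=rewrite | github.com/AndrasNyiri/AdventOfCode | day9/day9.py | remove_character_after_exclamation_mark
-- ===== SOURCE A (Python) =====
-- def remove_character_after_exclamation_mark(stream):
--     index = 0
--     while index < len(stream) - 1:
--         if stream[index] == '!':
--             stream.pop(index)
--             stream.pop(index)
--         else:
--             index += 1
--     return stream
-- ===== SOURCE B (Python) =====
-- def remove_character_after_exclamation_mark(stream):
--     # single left-to-right pass building a new list.
--     # (A mutates its argument in place; B only computes the return value.)
--     out = []
--     i = 0
--     n = len(stream)
--     while i < n:
--         if stream[i] == '!' and i < n - 1: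
--             i += 2
--         else:
--             out.append(stream[i])
--             i += 1
--     return out
-- ===== Notes on version B (the rewrite author's own statement) =====
-- stated objective: alternative
-- what changed: Replaces the pop-at-index while loop that mutates the list in place with a single left-to-right pass that skips the character after each '!' (a trailing '!' with nothing after it is kept) and builds a new result list; B does not mutate the argument.
import Mathlib
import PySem

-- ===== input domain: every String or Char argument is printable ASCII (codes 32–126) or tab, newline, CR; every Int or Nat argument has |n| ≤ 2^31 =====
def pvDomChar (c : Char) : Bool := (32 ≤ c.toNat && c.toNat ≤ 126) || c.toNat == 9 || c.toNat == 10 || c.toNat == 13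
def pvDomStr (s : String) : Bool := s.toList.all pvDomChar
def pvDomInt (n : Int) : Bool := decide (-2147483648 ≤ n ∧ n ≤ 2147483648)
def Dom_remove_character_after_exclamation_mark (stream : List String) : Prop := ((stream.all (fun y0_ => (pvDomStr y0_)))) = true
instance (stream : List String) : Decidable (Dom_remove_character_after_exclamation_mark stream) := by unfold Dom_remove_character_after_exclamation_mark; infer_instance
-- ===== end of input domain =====

-- B replaces A's in-place pop-at-index loop by a single left-to-right pass building a new list;
-- A mutates its argument in place, B does not: the equivalence proved here is about the RETURN value only.


-- ===== PORT A =====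
-- literal port of A's while loop: index over the (mutating) list; stream.pop(index) is
-- List.eraseIdx (exact here since index is in range whenever it is performed)
def pvALoop (stream : List String) (index : Nat) : List String :=
  if _h : index + 1 < stream.length then
    if stream.getD index "" = "!" then
      pvALoop ((stream.eraseIdx index).eraseIdx index) index
    else
      pvALoop stream (index + 1)
  else
    stream
termination_by stream.length - index
decreasing_by
  · have h1 : (stream.eraseIdx index).length = stream.length - 1 :=
      List.length_eraseIdx_of_lt (by omega)
    have h2 : ((stream.eraseIdx index).eraseIdx index).length ≤ (stream.eraseIdx index).length :=
      List.length_eraseIdx_le _ _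
    omega
  · omega

def remove_character_after_exclamation_mark (stream : List String) : List String :=
  pvALoop stream 0

-- ===== PORT B =====
-- single pass: on "!" with a successor, drop both and continue after them; otherwise keep the element
def pvBLoop : List String → List String
  | [] => []
  | [x] => [x]
  | x :: y :: rest => if x = "!" then pvBLoop rest else x :: pvBLoop (y :: rest)

def remove_character_after_exclamation_mark_alt (stream : List String) : List String :=
  pvBLoop stream

-- ===== PRECONDITION & SPEC =====
def Spec_remove_character_after_exclamation_mark (stream : List String) (out : List String) : Prop := out = remove_character_after_exclamation_mark_alt stream
instance (stream : List String) (out : List String) : Decidable (Spec_remove_character_after_exclamation_mark stream out) := by unfold Spec_remove_character_after_exclamation_mark; infer_instance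

-- ===== CLAIM (what is proved, stated in full; the proofs are below) =====
def Claim_equal_remove_character_after_exclamation_mark : Prop := ∀ (stream : List String), Dom_remove_character_after_exclamation_mark stream → Spec_remove_character_after_exclamation_mark stream (remove_character_after_exclamation_mark stream)

-- ===== LEMMAS AND PROOFS =====

-- invariant: when A's index has reached the end of a processed prefix `pre`,
-- the loop leaves `pre` untouched and acts on the tail exactly like B's pass
theorem pvALoop_eq (rest : List String) (pre : List String) :
    pvALoop (pre ++ rest) pre.length = pre ++ pvBLoop rest := by
  induction hn : rest.length using Nat.strong_induction_on generalizing rest pre with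
  | _ n ih =>
    match rest with
    | [] =>
        rw [pvALoop]
        simp [pvBLoop]
    | [x] =>
        rw [pvALoop]
        simp [pvBLoop]
    | x :: y :: t =>
        have hn' : t.length + 2 = n := by simpa using hn
        rw [pvALoop]
        have hlen : (pre ++ x :: y :: t).length = pre.length + (t.length + 2) := by
          simp
        have hcond : pre.length + 1 < (pre ++ x :: y :: t).length := by omega
        have hget : (pre ++ x :: y :: t).getD pre.length "" = x := by
          simp [List.getD_eq_getElem?_getD]
        rw [dif_pos hcond, hget]
        by_cases hx : x = "!"
        · rw [if_pos hx]
          have he1 : (pre ++ x :: y :: t).eraseIdx pre.length = pre ++ y :: t := by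
            rw [List.eraseIdx_append_of_length_le (le_refl _)]
            simp
          have he2 : (pre ++ y :: t).eraseIdx pre.length = pre ++ t := by
            rw [List.eraseIdx_append_of_length_le (le_refl _)]
            simp
          rw [he1, he2, ih t.length (by omega) t pre rfl]
          simp [pvBLoop, hx]
        · rw [if_neg hx]
          have hassoc : pre ++ x :: y :: t = (pre ++ [x]) ++ y :: t := by simp
          have hl : pre.length + 1 = (pre ++ [x]).length := by simp
          rw [hassoc, hl, ih (y :: t).length (by simp; omega) (y :: t) (pre ++ [x]) rfl]
          simp [pvBLoop, hx]

-- ===== VERDICT (by name: the statement is the Claim_ definition above) =====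
theorem remove_character_after_exclamation_mark_spec : Claim_equal_remove_character_after_exclamation_mark := by
  intro stream _
  unfold Spec_remove_character_after_exclamation_mark remove_character_after_exclamation_mark remove_character_after_exclamation_mark_alt
  have := pvALoop_eq stream []
  simpa using this
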